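-- pv_equiv track=rewrite | github.com/Billymcokello24/ahtak-2 | ahtak/core/permissions.py | role_can_access
-- ===== SOURCE A (Python) =====
-- def role_can_access(role, resource, action='read'):
--     """Check if role can access resource. action: 'read' or 'write'."""
--     ACCESS = {
--         'super_admin': {r: 'rw' for r in ['members', 'events', 'payments', 'savings', 'contributions', 'reports', 'dashboard']},
--         'admin': {r: 'rw' for r in ['members', 'events', 'payments', 'savings', 'contributions', 'reports', 'dashboard']},
--         'loan_officer': {'members': 'r', 'events': 'r', 'payments': 'r', 'savings': 'r',
--                         'contributions': 'r', 'reports': 'r', 'dashboard': 'r'},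
--         'member': {'members': 'own', 'events': 'r', 'payments': 'r', 'savings': 'own',
--                    'contributions': 'own', 'reports': None, 'dashboard': 'r'},
--     }
--     acc = ACCESS.get(role, {})
--     r = acc.get(resource)
--     if r is None:
--         return False
--     if r == 'own':
--         return True
--     if action == 'write':
--         return r == 'rw'
--     return r in ('r', 'rw')
-- ===== SOURCE B (Python) =====
-- _RESOURCES = ('members', 'events', 'payments', 'savings', 'contributions', 'reports', 'dashboard')
--
--
-- def role_can_access(role, resource, action='read'):
--     """Check if role can access resource. action: 'read' or 'write'."""
--     if resource not in _RESOURCES: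
--         return False
--     if role in ('super_admin', 'admin'):
--         return True
--     if role == 'loan_officer':
--         return action != 'write'
--     if role == 'member':
--         if resource == 'reports':
--             return False
--         if resource in ('members', 'savings', 'contributions'):
--             return True  # 'own' resources: full access
--         return action != 'write'
--     return False
-- ===== Notes on version B (the rewrite author's own statement) =====
-- stated objective: simpler
-- what changed: Drops the nested permission table entirely: B decides access by rule-based logic on role semantics (admins get everything, loan_officer is read-only, member owns members/savings/contributions, has no reports, reads the rest), so no dict is built or looked up at all.
import Mathlib
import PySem

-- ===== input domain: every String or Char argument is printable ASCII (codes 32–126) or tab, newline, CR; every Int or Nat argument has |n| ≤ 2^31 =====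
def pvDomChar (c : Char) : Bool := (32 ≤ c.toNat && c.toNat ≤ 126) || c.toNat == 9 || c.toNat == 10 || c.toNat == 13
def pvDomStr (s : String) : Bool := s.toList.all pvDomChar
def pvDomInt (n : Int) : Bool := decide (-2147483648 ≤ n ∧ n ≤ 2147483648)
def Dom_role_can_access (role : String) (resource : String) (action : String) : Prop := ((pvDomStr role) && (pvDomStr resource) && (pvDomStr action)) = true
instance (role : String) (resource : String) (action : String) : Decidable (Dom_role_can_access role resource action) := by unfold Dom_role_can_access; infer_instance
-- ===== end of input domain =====

-- B discards A's nested permission table and decides access by rule-based logic on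
-- role semantics (a few string comparisons, no dict at all); objective: simpler.


-- ===== PORT A =====
def role_can_access (role : String) (resource : String) (action : String) : Bool :=
  let ACCESS : PySem.Dict String (PySem.Dict String (Option String)) :=
    PySem.Dict.ofList
      [ ("super_admin", PySem.Dict.ofList
          (["members", "events", "payments", "savings", "contributions", "reports", "dashboard"].map
            (fun r => (r, some "rw")))),
        ("admin", PySem.Dict.ofList
          (["members", "events", "payments", "savings", "contributions", "reports", "dashboard"].map
            (fun r => (r, some "rw")))),
        ("loan_officer", PySem.Dict.ofList
          [("members", some "r"), ("events", some "r"), ("payments", some "r"), ("savings", some "r"),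
           ("contributions", some "r"), ("reports", some "r"), ("dashboard", some "r")]),
        ("member", PySem.Dict.ofList
          [("members", some "own"), ("events", some "r"), ("payments", some "r"), ("savings", some "own"),
           ("contributions", some "own"), ("reports", none), ("dashboard", some "r")]) ]
  let acc := ACCESS.getD role PySem.Dict.empty
  let r : Option String := acc.getD resource none   -- acc.get(resource): stored value, None if absent
  match r with
  | none => false
  | some s =>
    if s == "own" then true
    else if action == "write" then s == "rw"
    else (s == "r" || s == "rw")

-- ===== PORT B =====
def pvResourcesB : List String :=
  ["members", "events", "payments", "savings", "contributions", "reports", "dashboard"]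

def role_can_access_alt (role : String) (resource : String) (action : String) : Bool :=
  if !(pvResourcesB.contains resource) then false
  else if role == "super_admin" || role == "admin" then true
  else if role == "loan_officer" then action != "write"
  else if role == "member" then
    if resource == "reports" then false
    else if resource == "members" || resource == "savings" || resource == "contributions" then true
    else action != "write"
  else false

-- ===== PRECONDITION & SPEC =====
def Spec_role_can_access (role : String) (resource : String) (action : String) (out : Bool) : Prop := out = role_can_access_alt role resource action
instance (role : String) (resource : String) (action : String) (out : Bool) : Decidable (Spec_role_can_access role resource action out) := by unfold Spec_role_can_access; infer_instance

-- ===== CLAIM (what is proved, stated in full; the proofs are below) =====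
def Claim_equal_role_can_access : Prop := ∀ (role : String) (resource : String) (action : String), Dom_role_can_access role resource action → Spec_role_can_access role resource action (role_can_access role resource action)

-- ===== LEMMAS AND PROOFS =====

-- ===== VERDICT (by name: the statement is the Claim_ definition above) =====
set_option maxHeartbeats 2000000 in
theorem role_can_access_spec : Claim_equal_role_can_access := by
  intro role resource action _
  unfold Spec_role_can_access role_can_access role_can_access_alt pvResourcesB
  simp only [List.map, PySem.Dict.ofList, PySem.Dict.update, List.foldl,
    PySem.Dict.getD_insert, PySem.Dict.getD_empty, List.contains_cons,
    List.contains_nil, Bool.or_false]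
  split_ifs <;>
    simp only [PySem.Dict.getD_insert, PySem.Dict.getD_empty] <;>
    first
      | (split_ifs <;> simp_all)
      | simp_all
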